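-- pv_equiv track=rewrite | github.com/SuleMareVientu/GameplayFixesV-ScriptHookV | ParsePickupTypesJson.py | joaat
-- ===== SOURCE A (Python) =====
-- def joaat(s: str) -> int:
--     """
--     Calculates the JOAAT (Jenkins One-At-A-Time) hash of a string.
--
--     Args:
--         s: The input string.
--
--     Returns:
--         The JOAAT hash as an unsigned 32-bit integer.
--     """
--     if s is None or not s:
--         return 0
--
--     hash_val = 0
--     for char_code in s.encode('utf-8'):  # Iterate over byte values
--         b = char_code
--         if ord('A') <= b <= ord('Z'):
--             b = b | (1 << 5)  # Convert to lowercase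
--         elif b == ord('\\'):
--             b = ord('/')
--
--         hash_val = (hash_val + b) & 0xFFFFFFFF  # Ensure 32-bit unsigned
--         hash_val = (hash_val + (hash_val << 10)) & 0xFFFFFFFF
--         hash_val = (hash_val ^ (hash_val >> 6)) & 0xFFFFFFFF
--
--     # Finalize hash
--     hash_val = (hash_val + (hash_val << 3)) & 0xFFFFFFFF
--     hash_val = (hash_val ^ (hash_val >> 11)) & 0xFFFFFFFF
--     hash_val = (hash_val + (hash_val << 15)) & 0xFFFFFFFF
--
--     return hash_val
-- ===== SOURCE B (Python) =====
-- def _mix(h: int, b: int) -> int: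
--     """One JOAAT round: normalize byte b, then the three mixing steps."""
--     if 0x41 <= b <= 0x5A:
--         b |= 0x20
--     elif b == 0x5C:
--         b = 0x2F
--     h = (h + b) & 0xFFFFFFFF
--     h = (h + (h << 10)) & 0xFFFFFFFF
--     return (h ^ (h >> 6)) & 0xFFFFFFFF
--
--
-- def _run(h: int, data: bytes, lo: int, hi: int) -> int:
--     """Thread the hash state through data[lo:hi] by splitting the range in half
--     (balanced recursion, depth O(log n)); correct because the fold is sequential
--     and state-threading over two adjacent halves composes to the fold over the whole."""
--     n = hi - lo
--     if n == 0:
--         return h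
--     if n == 1:
--         return _mix(h, data[lo])
--     mid = lo + n // 2
--     return _run(_run(h, data, lo, mid), data, mid, hi)
--
--
-- def joaat(s: str) -> int:
--     if s is None or not s:
--         return 0
--     data = s.encode('utf-8')
--     h = _run(0, data, 0, len(data))
--     h = (h + (h << 3)) & 0xFFFFFFFF
--     h = (h ^ (h >> 11)) & 0xFFFFFFFF
--     return (h + (h << 15)) & 0xFFFFFFFF
-- ===== Notes on version B (the rewrite author's own statement) =====
-- stated objective: alternative
-- what changed: A's linear for-loop over the bytes is replaced by a balanced divide-and-conquer recursion that splits the byte range in half and threads the hash state through the two adjacent halves (depth O(log n)), with the per-byte round factored into a helper.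
import Mathlib
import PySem

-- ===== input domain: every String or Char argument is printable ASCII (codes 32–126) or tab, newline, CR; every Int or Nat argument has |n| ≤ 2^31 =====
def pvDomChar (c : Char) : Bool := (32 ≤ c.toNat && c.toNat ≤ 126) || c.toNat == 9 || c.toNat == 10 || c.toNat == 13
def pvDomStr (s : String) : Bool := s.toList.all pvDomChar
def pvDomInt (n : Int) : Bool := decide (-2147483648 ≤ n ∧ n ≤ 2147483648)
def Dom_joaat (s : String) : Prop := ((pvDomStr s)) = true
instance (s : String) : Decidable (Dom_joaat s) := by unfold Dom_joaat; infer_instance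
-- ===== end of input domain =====

-- B replaces A's linear for-loop over the bytes by a balanced divide-and-conquer recursion
-- that threads the hash state through the two halves; same O(n) cost, no speed claim.

-- ===== PORT A =====
-- s.encode('utf-8') is ported as s.toList.map Char.toNat: exact on the ASCII domain Dom_joaat,
-- where every character is a single byte equal to its code point.
def joaat (s : String) : Int :=
  if s.isEmpty then 0 else
  let hv : Nat := (s.toList.map Char.toNat).foldl (fun h b =>
      let b := if 65 ≤ b ∧ b ≤ 90 then b ||| 32 else if b = 92 then 47 else b
      let h := (h + b) % 4294967296
      let h := (h + h * 1024) % 4294967296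
      (h ^^^ (h / 64)) % 4294967296) 0
  let hv : Nat := (hv + hv * 8) % 4294967296
  let hv : Nat := (hv ^^^ (hv / 2048)) % 4294967296
  let hv : Nat := (hv + hv * 32768) % 4294967296
  (hv : Int)

-- ===== PORT B =====
-- one JOAAT round: normalize the byte, then the three mixing steps (Source B's _mix)
def mixB (h b : Nat) : Nat :=
  let b := if 65 ≤ b ∧ b ≤ 90 then b ||| 32 else if b = 92 then 47 else b
  let h := (h + b) % 4294967296
  let h := (h + h * 1024) % 4294967296
  (h ^^^ (h / 64)) % 4294967296

-- Source B's _run: the range data[lo:hi] is carried as the sublist itself; splitting at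
-- mid = lo + n // 2 becomes take/drop at n / 2.
def runB (h : Nat) (data : List Nat) : Nat :=
  if hn : data.length ≤ 1 then
    match data with
    | [] => h
    | b :: _ => mixB h b
  else
    let m := data.length / 2
    runB (runB h (data.take m)) (data.drop m)
termination_by data.length
decreasing_by
  · simp only [List.length_take]; omega
  · simp only [List.length_drop]; omega

def joaat_alt (s : String) : Int :=
  if s.isEmpty then 0 else
  let hv : Nat := runB 0 (s.toList.map Char.toNat)
  let hv : Nat := (hv + hv * 8) % 4294967296
  let hv : Nat := (hv ^^^ (hv / 2048)) % 4294967296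
  let hv : Nat := (hv + hv * 32768) % 4294967296
  (hv : Int)

-- ===== PRECONDITION & SPEC =====
def Spec_joaat (s : String) (out : Int) : Prop := out = joaat_alt s
instance (s : String) (out : Int) : Decidable (Spec_joaat s out) := by unfold Spec_joaat; infer_instance

-- ===== CLAIM (what is proved, stated in full; the proofs are below) =====
def Claim_equal_joaat : Prop := ∀ (s : String), Dom_joaat s → Spec_joaat s (joaat s)

-- ===== LEMMAS AND PROOFS =====

-- the divide-and-conquer state threading computes the left fold of the round function
theorem runB_eq_foldl : ∀ (n : Nat) (l : List Nat), l.length = n →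
    ∀ h, runB h l = l.foldl mixB h := by
  intro n
  induction n using Nat.strong_induction_on with
  | _ n ih =>
    intro l hl h
    rw [runB]
    split
    · next h1 =>
      match l with
      | [] => rfl
      | [b] => rfl
      | a :: b :: t => simp at h1
    · next h1 =>
      show runB (runB h (l.take (l.length / 2))) (l.drop (l.length / 2)) = _
      rw [ih (l.take (l.length / 2)).length (by simp only [List.length_take]; omega) _ rfl,
          ih (l.drop (l.length / 2)).length (by simp only [List.length_drop]; omega) _ rfl,
          ← List.foldl_append, List.take_append_drop]

-- ===== VERDICT (by name: the statement is the Claim_ definition above) =====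
theorem joaat_spec : Claim_equal_joaat := by
  intro s _
  simp only [Spec_joaat, joaat, joaat_alt]
  rw [runB_eq_foldl (s.toList.map Char.toNat).length _ rfl]
  rfl
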